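-- pv_equiv track=rewrite | github.com/jake-87/python-blackjack | bjp/bjp.py | customsumas11
-- ===== SOURCE A (Python) =====
-- import copy
--
-- def customsumas11(nums): # Custom sum assuming 11
--     tmp = copy.copy(nums)
--     for i in range(len(nums)):
--         if tmp[i] > 9:
--             tmp[i] = 9
--     total = 0
--     for i in range(len(tmp)):
--         total += tmp[i] + 1
--         if tmp[i] == 0:
--             total += 10
--     return total
-- ===== SOURCE B (Python) =====
-- def customsumas11(nums): # Custom sum assuming 11
--     freq = {}
--     for x in nums:
--         freq[x] = freq.get(x, 0) + 1
--     total = 0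
--     for v, c in freq.items():
--         total += c * ((9 if v > 9 else v) + 1 + (10 if v == 0 else 0))
--     return total
-- ===== Notes on version B (the rewrite author's own statement) =====
-- stated objective: alternative
-- what changed: B tallies a frequency dictionary in one pass and then sums count*score over the distinct values, instead of A's clamp-in-place loop followed by a per-element branching accumulator loop.
import Mathlib
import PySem

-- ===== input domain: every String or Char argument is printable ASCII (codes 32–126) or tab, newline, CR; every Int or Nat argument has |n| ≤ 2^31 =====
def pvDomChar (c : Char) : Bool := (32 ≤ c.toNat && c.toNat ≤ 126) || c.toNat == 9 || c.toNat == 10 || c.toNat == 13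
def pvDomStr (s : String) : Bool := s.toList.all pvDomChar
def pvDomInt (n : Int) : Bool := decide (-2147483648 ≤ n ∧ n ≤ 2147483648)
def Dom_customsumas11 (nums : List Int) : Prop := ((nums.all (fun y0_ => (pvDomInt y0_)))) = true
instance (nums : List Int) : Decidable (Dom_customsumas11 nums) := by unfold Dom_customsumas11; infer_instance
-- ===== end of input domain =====

-- B tallies a frequency dictionary in one pass and then sums count*score over the
-- distinct values, instead of A's clamp-in-place loop plus per-element accumulator loop.

-- ===== PORT A =====
-- first loop clamps tmp[i] in place; i is always in range, so pyGet?'s 'none' branch is unreachable and leaves t unchanged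
def customsumas11 (nums : List Int) : Int :=
  let tmp := (PySem.List.pyRange 0 (PySem.List.len nums) 1).foldl
    (fun t i =>
      match PySem.List.pyGet? t i with
      | some v => if v > (9:Int) then t.set i.toNat (9:Int) else t
      | none => t) nums
  (PySem.List.pyRange 0 (PySem.List.len tmp) 1).foldl
    (fun total i =>
      match PySem.List.pyGet? tmp i with
      | some v => (total + v + 1) + (if v == 0 then 10 else 0)
      | none => total) 0

-- ===== PORT B =====
def customsumas11_alt (nums : List Int) : Int :=
  let freq := nums.foldl (fun d x => d.insert x (d.getD x 0 + 1)) (PySem.Dict.empty : PySem.Dict Int Int)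
  freq.items.foldl
    (fun total p =>
      total + p.2 * ((if p.1 > 9 then (9:Int) else p.1) + 1 + (if p.1 == 0 then 10 else 0))) 0

-- ===== PRECONDITION & SPEC =====
def Spec_customsumas11 (nums : List Int) (out : Int) : Prop := out = customsumas11_alt nums
instance (nums : List Int) (out : Int) : Decidable (Spec_customsumas11 nums out) := by unfold Spec_customsumas11; infer_instance

-- ===== CLAIM (what is proved, stated in full; the proofs are below) =====
def Claim_equal_customsumas11 : Prop := ∀ (nums : List Int), Dom_customsumas11 nums → Spec_customsumas11 nums (customsumas11 nums)

-- ===== LEMMAS AND PROOFS =====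

-- the per-element score both programs distribute over nums
def pvScore (x : Int) : Int := (if x > 9 then (9:Int) else x) + 1 + (if x == 0 then 10 else 0)

-- A's first loop, started after an already-processed prefix p, maps the clamp over the suffix
theorem pv_loop1_gen : ∀ (s p : List Int),
    (PySem.List.pyRange p.length (p.length + s.length) 1).foldl
      (fun t i =>
        match PySem.List.pyGet? t i with
        | some v => if v > (9:Int) then t.set i.toNat (9:Int) else t
        | none => t) (p ++ s)
    = p ++ s.map (fun x => if x > 9 then (9 : Int) else x) := by
  intro s
  induction s with
  | nil => intro p; rw [PySem.List.pyRange_one_eq_nil (by simp)]; simp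
  | cons x s' ih =>
    intro p
    rw [PySem.List.pyRange_one_cons (by simp)]
    rw [List.foldl_cons]
    have hg : PySem.List.pyGet? (p ++ x :: s') (p.length : Int) = some x := by
      rw [PySem.List.pyGet?_natCast]; simp
    rw [hg]
    by_cases hx : x > (9:Int)
    · simp only [hx, if_pos, Int.toNat_natCast]
      have hset : (p ++ x :: s').set p.length 9 = (p ++ [(9:Int)]) ++ s' := by simp
      rw [hset]
      have h1 : ((p.length : Int) + 1) = ((p ++ [(9:Int)]).length : Int) := by simp
      have h2 : ((p.length : Int) + ((x :: s').length : Int)) = ((p ++ [(9:Int)]).length : Int) + s'.length := by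
        simp; omega
      rw [h1, h2, ih]
      simp [hx]
    · simp only [hx, if_false, Int.toNat_natCast]
      have h1 : ((p.length : Int) + 1) = ((p ++ [x]).length : Int) := by simp
      have h2 : ((p.length : Int) + ((x :: s').length : Int)) = ((p ++ [x]).length : Int) + s'.length := by
        simp; omega
      have hps : p ++ x :: s' = (p ++ [x]) ++ s' := by simp
      rw [h1, h2, hps, ih]
      simp [hx]

-- A's second loop is a plain fold over the list itself
theorem pv_loop2 (t : List Int) (acc : Int) :
    (PySem.List.pyRange 0 t.length 1).foldl
      (fun total i =>
        match PySem.List.pyGet? t i with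
        | some v => (total + v + 1) + (if v == 0 then 10 else 0)
        | none => total) acc
    = t.foldl (fun total v => (total + v + 1) + (if v == 0 then 10 else 0)) acc := by
  rw [← PySem.List.foldl_pyRange_zero_pyGetD t 0 (fun total v => (total + v + 1) + (if v == 0 then 10 else 0)) acc]
  apply PySem.List.foldl_congr_mem'
  intro i hi acc'
  obtain ⟨h1, h2⟩ := (PySem.List.mem_pyRange_one).1 hi
  have h2' : i < (t.length : Int) := by simpa using h2
  have hlt : i.toNat < t.length := by omega
  have hi' : i = ((i.toNat : Nat) : Int) := (Int.toNat_of_nonneg h1).symm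
  have hg : PySem.List.pyGet? t i = some t[i.toNat] := by
    conv_lhs => rw [hi']
    rw [PySem.List.pyGet?_natCast]
    simp [List.getElem?_eq_getElem hlt]
  have hd : PySem.List.pyGetD t i 0 = t[i.toNat] := by
    conv_lhs => rw [hi']
    rw [PySem.List.pyGetD_natCast]
    simp [List.getD_eq_getElem?_getD, List.getElem?_eq_getElem hlt]
  rw [hg, hd]

-- A's accumulator loop, as an explicit sum over its body's per-element contribution
theorem pv_foldA : ∀ (l : List Int) (acc : Int),
    l.foldl (fun total v => (total + v + 1) + (if v == 0 then 10 else 0)) acc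
    = acc + (l.map (fun v => v + 1 + (if v == 0 then 10 else 0))).sum := by
  intro l
  induction l with
  | nil => intro acc; simp
  | cons x l' ih =>
    intro acc
    simp only [List.foldl_cons, List.map_cons, List.sum_cons]
    rw [ih]
    ring

-- A's value is the sum of pvScore over nums
theorem pv_A_eq_sum (nums : List Int) :
    customsumas11 nums = (nums.map pvScore).sum := by
  unfold customsumas11
  simp only [PySem.List.len_eq]
  have h1 := pv_loop1_gen nums []
  simp only [List.length_nil, List.nil_append, Nat.cast_zero, zero_add] at h1
  rw [h1]
  rw [pv_loop2, pv_foldA]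
  rw [List.map_map]
  simp only [zero_add]
  congr 1
  apply List.map_congr_left
  intro x _
  simp only [Function.comp_apply, pvScore]
  by_cases hx : x > (9:Int)
  · have h9 : ((9:Int) == 0) = false := by decide
    have hx0 : (x == 0) = false := by simp; omega
    simp [hx, h9, hx0]
  · simp [hx]

-- over a Nodup list containing x, the indicator sum picks out c x
theorem pv_sum_indicator (c : Int → Int) : ∀ (S : List Int) (x : Int), S.Nodup → x ∈ S →
    (S.map (fun k => if k = x then c k else 0)).sum = c x := by
  intro S
  induction S with
  | nil => intro x _ hx; cases hx
  | cons a S' ih =>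
    intro x hnd hx
    simp only [List.map_cons, List.sum_cons]
    rcases List.mem_cons.1 hx with h | h
    · subst h
      have : ∀ k ∈ S', (if k = x then c k else 0) = 0 := by
        intro k hk
        have : k ≠ x := fun he => (List.nodup_cons.1 hnd).1 (he ▸ hk)
        simp [this]
      rw [List.map_congr_left this]
      simp
    · have hne : a ≠ x := fun he => (List.nodup_cons.1 hnd).1 (he ▸ h)
      rw [ih x (List.nodup_cons.1 hnd).2 h]
      simp [hne]

-- summing count·score over any Nodup superset of l's elements equals summing score over l
theorem pv_sum_count_mul : ∀ (l S : List Int), S.Nodup → (∀ x ∈ l, x ∈ S) →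
    (S.map (fun k => (l.count k : Int) * pvScore k)).sum = (l.map pvScore).sum := by
  intro l
  induction l with
  | nil => intro S _ _; simp
  | cons x l' ih =>
    intro S hnd hsub
    have hx : x ∈ S := hsub x (List.mem_cons_self)
    have hsub' : ∀ y ∈ l', y ∈ S := fun y hy => hsub y (List.mem_cons_of_mem _ hy)
    have hsplit : ∀ k, (((x :: l').count k : Nat) : Int) * pvScore k
        = (l'.count k : Int) * pvScore k + (if k = x then pvScore k else 0) := by
      intro k
      rw [List.count_cons]
      by_cases hk : k = x
      · simp [hk]; ring
      · have hkx : ¬ x = k := fun h => hk h.symm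
        simp [hk, hkx]
    rw [List.map_congr_left (fun k _ => hsplit k)]
    rw [List.sum_map_add]
    rw [ih S hnd hsub', pv_sum_indicator pvScore S x hnd hx]
    simp
    ring

-- B's value is the same sum, via the counter characterisation of the frequency dict
theorem pv_B_eq_sum (nums : List Int) :
    customsumas11_alt nums = (nums.map pvScore).sum := by
  unfold customsumas11_alt
  rw [PySem.Dict.foldl_insert_getD_add_one_eq_counter]
  simp only [PySem.Dict.items_counter]
  rw [PySem.List.foldl_add]
  rw [List.map_map]
  simp only [zero_add]
  have : ((PySem.Set.ofList nums : List Int).map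
      ((fun p : Int × Int => p.2 * ((if p.1 > 9 then (9:Int) else p.1) + 1 + (if p.1 == 0 then 10 else 0)))
        ∘ (fun k => (k, (nums.count k : Int)))))
      = (PySem.Set.ofList nums : List Int).map (fun k => (nums.count k : Int) * pvScore k) := by
    apply List.map_congr_left
    intro k _
    simp [Function.comp_apply, pvScore]
  rw [this]
  exact pv_sum_count_mul nums _ (PySem.Set.nodup_ofList nums) (fun x hx => (PySem.Set.mem_ofList _ _).2 hx)

-- ===== VERDICT (by name: the statement is the Claim_ definition above) =====
theorem customsumas11_spec : Claim_equal_customsumas11 := by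
  intro nums _
  show _ = _
  rw [pv_A_eq_sum, pv_B_eq_sum]
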